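-- pv_equiv track=rewrite | github.com/nf-core/msproteomics | modules/local/tmtlabelcheck/resources/usr/bin/tmt_qc.py | strip_common_prefix
-- ===== SOURCE A (Python) =====
-- from typing import Dict, List, Optional, Tuple, Any
--
-- def find_common_prefix(names: List[str]) -> str:
--     """
--     Find the common prefix among a list of sample names.
--
--     Args:
--         names: List of sample names
--
--     Returns:
--         Common prefix string (may be empty)
--     """
--     if not names or len(names) < 2:
--         return ""
--
--     # Find common prefix
--     prefix = names[0]
--     for name in names[1:]:
--         while not name.startswith(prefix) and prefix:
--             prefix = prefix[:-1]
--
--     # Don't strip the entire name - keep at least the unique part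
--     # Also, try to break at a natural boundary (underscore, dash, etc.)
--     if prefix:
--         # Find last separator in prefix
--         for sep in ["_", "-", "."]:
--             last_sep = prefix.rfind(sep)
--             if last_sep > 0:
--                 prefix = prefix[: last_sep + 1]
--                 break
--
--     return prefix
--
-- def strip_common_prefix(names: List[str]) -> Tuple[List[str], str]:
--     """
--     Strip common prefix from sample names for cleaner display.
--
--     Args:
--         names: List of sample names
--
--     Returns:
--         Tuple of (stripped_names, common_prefix)
--     """
--     prefix = find_common_prefix(names)
--     if prefix:
--         stripped = [
--             name[len(prefix) :] if name.startswith(prefix) else name for name in names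
--         ]
--         return stripped, prefix
--     return names, ""
-- ===== SOURCE B (Python) =====
-- from typing import List, Tuple
--
-- def strip_common_prefix(names: List[str]) -> Tuple[List[str], str]:
--     if len(names) < 2:
--         return names, ""
--     # longest common prefix by a single column scan
--     first, rest = names[0], names[1:]
--     k = 0
--     while k < len(first) and all(k < len(n) and n[k] == first[k] for n in rest):
--         k += 1
--     prefix = first[:k]
--     # truncate at the last natural separator (same priority order as before)
--     for sep in ("_", "-", "."):
--         last = prefix.rfind(sep)
--         if last > 0:
--             prefix = prefix[: last + 1]
--             break
--     if prefix:
--         return [n[len(prefix):] for n in names], prefix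
--     return names, ""
-- ===== Notes on version B (the rewrite author's own statement) =====
-- stated objective: alternative
-- what changed: find_common_prefix is inlined and the per-name suffix-shrink loop (repeatedly chopping the last character of the candidate prefix and re-testing startswith) is replaced by a single left-to-right column scan that advances an index while every name agrees with names[0] at that position; the final strip slices unconditionally since the computed prefix is a prefix of every name.
import Mathlib
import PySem

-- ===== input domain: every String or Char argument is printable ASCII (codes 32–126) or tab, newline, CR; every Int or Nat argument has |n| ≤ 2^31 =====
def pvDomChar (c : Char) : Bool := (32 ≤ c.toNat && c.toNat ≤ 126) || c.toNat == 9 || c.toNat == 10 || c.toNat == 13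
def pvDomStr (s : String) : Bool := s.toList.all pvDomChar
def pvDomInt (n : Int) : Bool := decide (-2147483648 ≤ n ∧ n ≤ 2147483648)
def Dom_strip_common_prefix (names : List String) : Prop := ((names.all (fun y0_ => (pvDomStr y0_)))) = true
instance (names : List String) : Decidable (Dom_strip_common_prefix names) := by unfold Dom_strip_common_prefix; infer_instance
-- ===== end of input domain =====

-- B inlines find_common_prefix and computes the common prefix by a single column scan
-- instead of A's per-name suffix-shrink loop (objective: alternative algorithm, same result).


-- ===== PORT A =====
-- while not name.startswith(prefix) and prefix: prefix = prefix[:-1]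
def pvShrinkA (name p : List Char) : List Char :=
  if h : PySem.Chars.startswith name p = false ∧ p ≠ [] then
    pvShrinkA name (PySem.Chars.slice p none (some (-1)))
  else p
termination_by p.length
decreasing_by
  simp only [PySem.Chars.slice_eq_listSlice, PySem.List.slice_to_neg_one, List.length_dropLast]
  have : p.length ≠ 0 := by simpa [List.length_eq_zero_iff] using h.2
  omega

-- for sep in ["_","-","."]: last_sep = prefix.rfind(sep); if last_sep > 0: prefix = prefix[:last_sep+1]; break
def pvSepTrimA (p : List Char) : List (List Char) → List Char
  | [] => p
  | sep :: seps =>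
    let last_sep := PySem.Chars.rfind p sep
    if last_sep > 0 then PySem.Chars.slice p none (some (last_sep + 1))
    else pvSepTrimA p seps

def find_common_prefix (names : List String) : List Char :=
  if names = [] ∨ names.length < 2 then []
  else
    let p := (names.drop 1).foldl (fun pr n => pvShrinkA n.toList pr) (names.headD "").toList
    if p ≠ [] then pvSepTrimA p [['_'], ['-'], ['.']] else p

def strip_common_prefix (names : List String) : List String × String :=
  let pfx := find_common_prefix names
  if pfx ≠ [] then
    (names.map (fun n =>
      if PySem.Chars.startswith n.toList pfx then
        String.ofList (PySem.Chars.slice n.toList (some (pfx.length : Int)) none)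
      else n),
     String.ofList pfx)
  else (names, "")

-- ===== PORT B =====
-- while k < len(first) and all(k < len(n) and n[k] == first[k] for n in rest): k += 1
-- (the getD default is never read: the guard ensures k is in range)
def pvColK (first : List Char) (rest : List (List Char)) (k : Nat) : Nat :=
  if h : k < first.length ∧ ∀ n ∈ rest, k < n.length ∧ n.getD k ' ' = first.getD k ' ' then
    pvColK first rest (k + 1)
  else k
termination_by first.length - k
decreasing_by omega

def pvSepTrimB (p : List Char) : List (List Char) → List Char
  | [] => p
  | sep :: seps =>
    let last := PySem.Chars.rfind p sep
    if last > 0 then PySem.Chars.slice p none (some (last + 1))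
    else pvSepTrimB p seps

def strip_common_prefix_alt (names : List String) : List String × String :=
  if names.length < 2 then (names, "")
  else
    let first := (names.headD "").toList
    let rest := (names.drop 1).map String.toList
    let k := pvColK first rest 0
    let pfx := pvSepTrimB (first.take k) [['_'], ['-'], ['.']]
    if pfx ≠ [] then
      (names.map (fun n => String.ofList (n.toList.drop pfx.length)), String.ofList pfx)
    else (names, "")

-- ===== PRECONDITION & SPEC =====
def Spec_strip_common_prefix (names : List String) (out : List String × String) : Prop := out = strip_common_prefix_alt names
instance (names : List String) (out : List String × String) : Decidable (Spec_strip_common_prefix names out) := by unfold Spec_strip_common_prefix; infer_instance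

-- ===== CLAIM (what is proved, stated in full; the proofs are below) =====
def Claim_equal_strip_common_prefix : Prop := ∀ (names : List String), Dom_strip_common_prefix names → Spec_strip_common_prefix names (strip_common_prefix names)

-- ===== LEMMAS AND PROOFS =====

/-- canonical longest common prefix of two char lists -/
def pvLcp : List Char → List Char → List Char
  | a :: as, b :: bs => if a = b then a :: pvLcp as bs else []
  | _, _ => []

theorem pvLcp_prefix_left : ∀ a b : List Char, pvLcp a b <+: a := by
  intro a
  induction a with
  | nil => intro b; cases b <;> simp [pvLcp]
  | cons x as ih =>
    intro b
    cases b with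
    | nil => simp [pvLcp]
    | cons y bs =>
      by_cases h : x = y <;> simp [pvLcp, h, ih]

theorem pvLcp_prefix_right : ∀ a b : List Char, pvLcp a b <+: b := by
  intro a
  induction a with
  | nil => intro b; cases b <;> simp [pvLcp]
  | cons x as ih =>
    intro b
    cases b with
    | nil => simp [pvLcp]
    | cons y bs =>
      by_cases h : x = y <;> simp [pvLcp, h]
      subst h; exact ih bs

theorem pvLcp_greatest : ∀ c a b : List Char, c <+: a → c <+: b → c <+: pvLcp a b := by
  intro c
  induction c with
  | nil => intro a b _ _; simp
  | cons x cs ih =>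
    intro a b ha hb
    obtain ⟨ta, ha⟩ := ha
    obtain ⟨tb, hb⟩ := hb
    subst ha; subst hb
    simp [pvLcp]
    exact ih _ _ ⟨ta, rfl⟩ ⟨tb, rfl⟩

theorem pvLcp_of_prefix : ∀ p n : List Char, p <+: n → pvLcp p n = p := by
  intro p
  induction p with
  | nil => intro n _; cases n <;> simp [pvLcp]
  | cons x ps ih =>
    intro n h
    obtain ⟨t, ht⟩ := h
    subst ht
    rw [List.cons_append]
    simp [pvLcp, ih (ps ++ t) ⟨t, rfl⟩]

theorem pvLcp_dropLast : ∀ p n : List Char, ¬ p <+: n → pvLcp p.dropLast n = pvLcp p n := by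
  intro p
  induction p with
  | nil => intro n h; exact absurd (List.nil_prefix) h
  | cons x ps ih =>
    intro n h
    cases n with
    | nil =>
      cases hd : (x :: ps).dropLast <;> simp [pvLcp]
    | cons y ns =>
      by_cases hxy : x = y
      · subst hxy
        have hps : ps ≠ [] := by
          rintro rfl
          exact h (by simp)
        rw [List.dropLast_cons_of_ne_nil hps]
        have hnp : ¬ ps <+: ns := fun hc => h (by simpa using hc)
        simp [pvLcp, ih ns hnp]
      · cases hps : ps with
        | nil => simp [pvLcp, hxy]
        | cons z zs =>
          rw [← hps, List.dropLast_cons_of_ne_nil (by simp [hps])]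
          simp [pvLcp, hxy]


theorem pvShrinkA_eq_pvLcp (n : List Char) : ∀ p : List Char, pvShrinkA n p = pvLcp p n := by
  intro p
  fun_induction pvShrinkA n p with
  | case1 p h ih =>
    rw [ih]
    simp only [PySem.Chars.slice_eq_listSlice, PySem.List.slice_to_neg_one]
    exact pvLcp_dropLast p n (by
      intro hc
      have := (PySem.Chars.startswith_iff n p).2 hc
      simp [this] at h)
  | case2 p h =>
    by_cases hsw : PySem.Chars.startswith n p = true
    · exact (pvLcp_of_prefix p n ((PySem.Chars.startswith_iff n p).1 hsw)).symm
    · have hp : p = [] := by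
        by_contra hne
        exact h ⟨by simpa using hsw, hne⟩
      subst hp; cases n <;> simp [pvLcp]

/-- A's fold over the remaining names, rewritten through pvLcp -/
theorem foldA_eq_foldLcp (l : List String) (init : List Char) :
    l.foldl (fun pr n => pvShrinkA n.toList pr) init
      = (l.map String.toList).foldl pvLcp init := by
  rw [List.foldl_map]
  induction l generalizing init with
  | nil => rfl
  | cons s t _ => simp only [List.foldl_cons, pvShrinkA_eq_pvLcp]

theorem foldLcp_prefix_head (l : List (List Char)) (init : List Char) :
    l.foldl pvLcp init <+: init := by
  induction l generalizing init with
  | nil => simp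
  | cons a t ih =>
    exact (ih (pvLcp init a)).trans (pvLcp_prefix_left init a)

theorem foldLcp_prefix_mem (l : List (List Char)) (init : List Char) :
    ∀ n ∈ l, l.foldl pvLcp init <+: n := by
  induction l generalizing init with
  | nil => simp
  | cons a t ih =>
    intro n hn
    rcases List.mem_cons.1 hn with hn | hn
    · subst hn
      exact (foldLcp_prefix_head t (pvLcp init n)).trans (pvLcp_prefix_right init n)
    · exact ih (pvLcp init a) n hn

theorem foldLcp_greatest (l : List (List Char)) (init c : List Char)
    (h1 : c <+: init) (h2 : ∀ n ∈ l, c <+: n) : c <+: l.foldl pvLcp init := by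
  induction l generalizing init with
  | nil => simpa using h1
  | cons a t ih =>
    simp only [List.foldl_cons]
    exact ih (pvLcp init a) (pvLcp_greatest c init a h1 (h2 a (by simp)))
      (fun n hn => h2 n (by simp [hn]))

/-- the column scan stops exactly at the length of the longest common prefix -/
theorem pvColK_eq (first : List Char) (rest : List (List Char)) (L : List Char)
    (hLf : L <+: first) (hLr : ∀ n ∈ rest, L <+: n)
    (hmax : ∀ c, c <+: first → (∀ n ∈ rest, c <+: n) → c <+: L) :
    ∀ k, k ≤ L.length → pvColK first rest k = L.length := by
  intro k
  induction hm : first.length - k using Nat.strong_induction_on generalizing k with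
  | _ m ih =>
    intro hk
    rw [pvColK]
    split
    · rename_i h
      -- the guard holds: show k < L.length, then recurse
      have hklt : k + 1 ≤ L.length := by
        by_contra hc
        have hkL : k = L.length := by omega
        -- first.take (k+1) is a common prefix longer than L: contradiction
        have hkf : k < first.length := h.1
        have htkL : first.take k = L := by
          rw [hkL]; exact (List.prefix_iff_eq_take.mp hLf).symm
        have hcpre : ∀ n ∈ rest, first.take (k + 1) <+: n := by
          intro n hn
          have hLn := hLr n hn
          have hkn : k < n.length := (h.2 n hn).1
          have heq : n.take (k + 1) = first.take (k + 1) := by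
            rw [List.take_add_one, List.take_add_one]
            have h1 : n.take k = first.take k := by
              rw [htkL, hkL]; exact (List.prefix_iff_eq_take.mp hLn).symm
            have h2 : n[k]? = first[k]? := by
              rw [List.getElem?_eq_getElem hkn, List.getElem?_eq_getElem hkf]
              have := (h.2 n hn).2
              rw [List.getD_eq_getElem n ' ' hkn, List.getD_eq_getElem first ' ' hkf] at this
              rw [this]
            rw [h1, h2]
          rw [← heq]; exact List.take_prefix _ _
        have hfin : first.take (k + 1) <+: L :=
          hmax _ (List.take_prefix _ _) hcpre
        have hlen := hfin.length_le
        rw [List.length_take] at hlen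
        omega
      rw [ih (first.length - (k + 1)) (by omega) (k + 1) rfl hklt]
    · rename_i h
      -- the guard fails: k = L.length
      by_contra hne
      have hklt : k < L.length := by omega
      apply h
      have hkf : k < first.length := lt_of_lt_of_le hklt hLf.length_le
      refine ⟨hkf, fun n hn => ?_⟩
      have hLn := hLr n hn
      have hkn : k < n.length := lt_of_lt_of_le hklt hLn.length_le
      refine ⟨hkn, ?_⟩
      rw [List.getD_eq_getElem n ' ' hkn, List.getD_eq_getElem first ' ' hkf]
      exact (List.IsPrefix.getElem hLn hklt).symm.trans (List.IsPrefix.getElem hLf hklt)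

theorem pvSepTrimA_eq_B (p : List Char) (seps : List (List Char)) :
    pvSepTrimA p seps = pvSepTrimB p seps := by
  induction seps with
  | nil => rfl
  | cons s t ih => simp [pvSepTrimA, pvSepTrimB, ih]

theorem pvSepTrimB_prefix (p : List Char) (seps : List (List Char)) :
    pvSepTrimB p seps <+: p := by
  induction seps with
  | nil => simp [pvSepTrimB]
  | cons s t ih =>
    simp only [pvSepTrimB]
    split
    · rename_i h
      have h0 : (0:Int) ≤ PySem.Chars.rfind p s + 1 := by omega
      rw [PySem.Chars.slice_eq_listSlice, PySem.List.slice_to p h0]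
      exact List.take_prefix _ _
    · exact ih

theorem pvSepTrimB_nil : pvSepTrimB [] [['_'], ['-'], ['.']] = [] := by decide

/-- the main case: at least two names -/
theorem pv_main (a b : String) (t2 : List String) :
    strip_common_prefix (a :: b :: t2) = strip_common_prefix_alt (a :: b :: t2) := by
  obtain ⟨L, hL⟩ : ∃ L, ((b :: t2).map String.toList).foldl pvLcp a.toList = L := ⟨_, rfl⟩
  have hLf : L <+: a.toList := hL ▸ foldLcp_prefix_head _ _
  have hLr : ∀ n ∈ (b :: t2).map String.toList, L <+: n := hL ▸ foldLcp_prefix_mem _ _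
  have hmax : ∀ c, c <+: a.toList → (∀ n ∈ (b :: t2).map String.toList, c <+: n) → c <+: L :=
    fun c h1 h2 => hL ▸ foldLcp_greatest _ _ c h1 h2
  have hcol : pvColK a.toList ((b :: t2).map String.toList) 0 = L.length :=
    pvColK_eq _ _ L hLf hLr hmax 0 (Nat.zero_le _)
  have htake : a.toList.take L.length = L := (List.prefix_iff_eq_take.mp hLf).symm
  have hall : ∀ n ∈ a :: b :: t2, L <+: n.toList := by
    intro n hn
    rcases List.mem_cons.1 hn with rfl | hn
    · exact hLf
    · exact hLr n.toList (List.mem_map_of_mem hn)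
  have hApfx : find_common_prefix (a :: b :: t2) = pvSepTrimB L [['_'], ['-'], ['.']] := by
    unfold find_common_prefix
    rw [if_neg (by simp)]
    simp only [List.drop_succ_cons, List.drop_zero, List.headD_cons]
    rw [foldA_eq_foldLcp, hL]
    by_cases hLnil : L = []
    · simp [hLnil, pvSepTrimB_nil]
    · rw [if_pos hLnil, pvSepTrimA_eq_B]
  have hPpre : ∀ n ∈ a :: b :: t2, pvSepTrimB L [['_'], ['-'], ['.']] <+: n.toList :=
    fun n hn => (pvSepTrimB_prefix L _).trans (hall n hn)
  simp only [strip_common_prefix, strip_common_prefix_alt, List.headD_cons,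
    List.drop_succ_cons, List.drop_zero, List.length_cons, hApfx, hcol, htake]
  rw [if_neg (show ¬ t2.length + 1 + 1 < 2 by omega)]
  by_cases hPnil : pvSepTrimB L [['_'], ['-'], ['.']] = []
  · simp [hPnil]
  · rw [if_pos hPnil, if_pos hPnil]
    simp only [Prod.mk.injEq]
    refine ⟨?_, trivial⟩
    apply List.map_congr_left
    intro n hn
    rw [if_pos ((PySem.Chars.startswith_iff n.toList _).mpr (hPpre n hn))]
    rw [PySem.Chars.slice_eq_listSlice, PySem.List.slice_from_natCast]

-- ===== VERDICT (by name: the statement is the Claim_ definition above) =====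
theorem strip_common_prefix_spec : Claim_equal_strip_common_prefix := by
  intro names _
  unfold Spec_strip_common_prefix
  match names with
  | [] => rfl
  | [a] => rfl
  | a :: b :: t2 => exact pv_main a b t2
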